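-- pv_equiv track=rewrite | github.com/chendu2017/two_stage_distributionally_robust_copositive_cone | co/Branch_Bound.py | _ConstructInitZ
-- ===== SOURCE A (Python) =====
-- from typing import Dict, List
--
-- def _ConstructInitZ(m: int, locations: List[int]) -> Dict[int, int]:
--     init_z = {}
--     for i in range(m):
--         if i in locations:
--             init_z[i] = 1
--         else:
--             init_z[i] = 0
--     return init_z
-- ===== SOURCE B (Python) =====
-- def _ConstructInitZ(m, locations):
--     init_z = {i: 0 for i in range(m)}
--     for loc in locations:
--         if 0 <= loc < m:
--             init_z[loc] = 1
--     return init_z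
-- ===== Notes on version B (the rewrite author's own statement) =====
-- stated objective: faster
-- what changed: Replaces the per-index linear membership scan over locations with a zero-filled dict comprehension followed by a single scatter pass over locations (bounds-guarded), removing the inner scan.
import Mathlib
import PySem

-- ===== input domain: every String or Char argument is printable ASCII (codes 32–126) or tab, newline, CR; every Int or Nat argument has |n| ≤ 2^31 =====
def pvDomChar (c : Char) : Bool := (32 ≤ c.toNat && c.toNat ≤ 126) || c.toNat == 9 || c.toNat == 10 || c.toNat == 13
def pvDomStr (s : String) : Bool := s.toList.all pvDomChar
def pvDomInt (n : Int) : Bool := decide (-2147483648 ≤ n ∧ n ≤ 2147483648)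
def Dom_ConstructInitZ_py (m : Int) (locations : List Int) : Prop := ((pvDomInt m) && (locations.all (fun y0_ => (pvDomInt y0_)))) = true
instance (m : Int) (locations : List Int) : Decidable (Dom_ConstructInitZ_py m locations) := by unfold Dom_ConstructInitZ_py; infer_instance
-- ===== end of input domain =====

-- B replaces A's per-index membership scan with a zero-fill dict comprehension plus one
-- bounds-guarded scatter pass over locations (objective: faster, no inner scan).

-- ===== PORT A =====
-- init_z = {}; for i in range(m): init_z[i] = 1 if i in locations else 0; return init_z
def ConstructInitZ_py (m : Int) (locations : List Int) : List (Int × Int) :=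
  ((PySem.List.pyRange 0 m 1).foldl
    (fun (d : PySem.Dict Int Int) i =>
      if locations.contains i then d.insert i 1 else d.insert i 0)
    PySem.Dict.empty).items

-- ===== PORT B =====
-- init_z = {i: 0 for i in range(m)}  — comprehension over distinct keys, built directly;
-- then: for loc in locations: if 0 <= loc < m: init_z[loc] = 1
def ConstructInitZ_py_alt (m : Int) (locations : List Int) : List (Int × Int) :=
  (locations.foldl
    (fun (d : PySem.Dict Int Int) loc =>
      if 0 ≤ loc ∧ loc < m then d.insert loc 1 else d)
    (PySem.Dict.mk ((PySem.List.pyRange 0 m 1).map (fun i => (i, 0))))).items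

-- ===== PRECONDITION & SPEC =====
def Spec_ConstructInitZ_py (m : Int) (locations : List Int) (out : List (Int × Int)) : Prop := out = ConstructInitZ_py_alt m locations
instance (m : Int) (locations : List Int) (out : List (Int × Int)) : Decidable (Spec_ConstructInitZ_py m locations out) := by unfold Spec_ConstructInitZ_py; infer_instance

-- ===== CLAIM (what is proved, stated in full; the proofs are below) =====
def Claim_equal_ConstructInitZ_py : Prop := ∀ (m : Int) (locations : List Int), Dom_ConstructInitZ_py m locations → Spec_ConstructInitZ_py m locations (ConstructInitZ_py m locations)

-- ===== LEMMAS AND PROOFS =====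

-- A's loop inserts fresh, distinct, increasing keys: its items list is a map over range(m).
theorem portA_eq_map (m : Int) (locations : List Int) :
    ConstructInitZ_py m locations
      = (PySem.List.pyRange 0 m 1).map
          (fun i => (i, if locations.contains i then (1 : Int) else 0)) := by
  unfold ConstructInitZ_py
  have hstep :
      (fun (d : PySem.Dict Int Int) i =>
        if locations.contains i then d.insert i 1 else d.insert i 0)
      = (fun (d : PySem.Dict Int Int) i =>
        d.insert (id i) (if locations.contains i then (1 : Int) else 0)) := by
    funext d i; by_cases h : i ∈ locations <;> simp [h]
  rw [hstep]
  rw [PySem.Dict.items_foldl_insert_fresh (PySem.List.pyRange 0 m 1) id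
        (fun i => if locations.contains i then (1 : Int) else 0) PySem.Dict.empty
        (fun a _ => by simp [PySem.Dict.contains_empty])
        (by simpa using PySem.List.nodup_pyRange_one 0 m)]
  simp [PySem.Dict.empty]

-- Inserting value 1 at a key already present in a map-shaped dict rewrites just that entry.
theorem insert_map_dict (r : List Int) (f : Int → Int) (k : Int) (hk : k ∈ r) :
    (PySem.Dict.mk (r.map (fun i => (i, f i)))).insert k 1
      = PySem.Dict.mk (r.map (fun i => (i, if i = k then 1 else f i))) := by
  induction r with
  | nil => cases hk
  | cons a r ih =>
    simp only [List.map_cons]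
    by_cases hak : a = k
    · subst hak
      apply PySem.Dict.ext
      have hc : (PySem.Dict.mk ((a, f a) :: r.map (fun i => (i, f i)))).contains a = true := by
        simp
      rw [PySem.Dict.items_insert_of_contains _ _ hc]
      simp only [List.map_cons, List.map_map]
      refine List.cons_eq_cons.mpr ⟨by simp, ?_⟩
      apply List.map_congr_left
      intro i _
      by_cases h : i = a <;> simp [h, Function.comp]
    · have hk' : k ∈ r := by
        rcases List.mem_cons.mp hk with h | h
        · exact absurd h.symm hak
        · exact h
      apply PySem.Dict.ext
      have hc : (PySem.Dict.mk ((a, f a) :: r.map (fun i => (i, f i)))).contains k = true := by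
        simp only [PySem.Dict.contains_iff_mem_keys, PySem.Dict.keys]
        simp [hk']
      rw [PySem.Dict.items_insert_of_contains _ _ hc]
      have hc' : (PySem.Dict.mk (r.map (fun i => (i, f i)))).contains k = true := by
        simp only [PySem.Dict.contains_iff_mem_keys, PySem.Dict.keys]
        simp [hk']
      have := PySem.Dict.items_insert_of_contains
        (PySem.Dict.mk (r.map (fun i => (i, f i)))) 1 hc'
      have ih' := ih hk'
      have ihitems := congrArg PySem.Dict.items ih'
      rw [this] at ihitems
      -- head/tail split of the cons equality
      simp only [List.map_cons]
      refine List.cons_eq_cons.mpr ⟨?_, ihitems⟩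
      have : (a == k) = false := by simp [hak]
      simp [this, hak]

-- B's scatter loop over an f-filled dict: the final dict maps i to 1 iff i occurs
-- in the processed locations (in-range entries only can change, and all keys are in range).
theorem scatter_eq (m : Int) (locations : List Int) (f : Int → Int) :
    (locations.foldl
        (fun (d : PySem.Dict Int Int) loc =>
          if 0 ≤ loc ∧ loc < m then d.insert loc 1 else d)
        (PySem.Dict.mk ((PySem.List.pyRange 0 m 1).map (fun i => (i, f i))))).items
      = (PySem.List.pyRange 0 m 1).map
          (fun i => (i, if locations.contains i then (1 : Int) else f i)) := by
  induction locations generalizing f with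
  | nil => simp
  | cons loc rest ih =>
    simp only [List.foldl_cons]
    by_cases hg : 0 ≤ loc ∧ loc < m
    · have hmem : loc ∈ PySem.List.pyRange 0 m 1 := by
        rw [PySem.List.mem_pyRange_one]; omega
      rw [if_pos hg, insert_map_dict _ _ _ hmem, ih]
      apply List.map_congr_left
      intro i _
      by_cases h1 : i ∈ rest <;> by_cases h2 : i = loc <;> simp [h1, h2]
    · rw [if_neg hg, ih]
      apply List.map_congr_left
      intro i hi
      rw [PySem.List.mem_pyRange_one] at hi
      have hne : i ≠ loc := by omega
      simp [hne]

-- ===== VERDICT (by name: the statement is the Claim_ definition above) =====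
theorem ConstructInitZ_py_spec : Claim_equal_ConstructInitZ_py := by
  intro m locations _
  unfold Spec_ConstructInitZ_py ConstructInitZ_py_alt
  rw [portA_eq_map, scatter_eq]
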